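-- pv_equiv track=rewrite | github.com/scraly/developers-conferences-agenda | tools/parser.py | parse_event_name
-- ===== SOURCE A (Python) =====
-- def parse_event_name(s):
-- 	counter = 0
-- 	final = ''
-- 	escapedState = False
--
-- 	# s[1:] to skip prefix '[' in Markdown
-- 	counter += 1
-- 	for ch in s[1:]:
-- 		counter += 1
-- 		if ch == '\\':
-- 			escapedState = True
-- 			continue
-- 		if escapedState:
-- 			final += ch
-- 		elif ch != ']':
-- 			final += ch
-- 		elif ch == ']':
-- 			# Done.
-- 			break
--
-- 	return final, s[counter:]
-- ===== SOURCE B (Python) =====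
-- def parse_event_name(s):
--     name = []
--     i = 1
--     while i < len(s):
--         ch = s[i]
--         if ch == '\\':
--             if i + 1 < len(s):
--                 name.append(s[i + 1])
--             i += 2
--         elif ch == ']':
--             return ''.join(name), s[i + 1:]
--         else:
--             name.append(ch)
--             i += 1
--     return ''.join(name), ''
-- ===== Notes on version B (the rewrite author's own statement) =====
-- stated objective: idiomatic
-- what changed: Replaces A's for-loop with a sticky escapedState flag and a running counter by an index-based scanner that treats a backslash as escaping exactly the next character (consuming two characters at once) and returns early with a tail slice at the first unescaped ']'.
-- intended difference: On strings where s[1:] has a backslash before any ']' and, later, a double backslash or a ']' not immediately preceded by a backslash, A's never-resetting escape flag swallows every later ']' and consumes the whole string (e.g. ('ab]c','') for '[a\b]c'), while B escapes only the next character and stops at the first unescaped ']' (('ab','c')), the intended Markdown link-name parse. — e.g. on parse_event_name("[a\\b]c"): A returns ("ab]c", ""), B returns ("ab", "c")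
import Mathlib
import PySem

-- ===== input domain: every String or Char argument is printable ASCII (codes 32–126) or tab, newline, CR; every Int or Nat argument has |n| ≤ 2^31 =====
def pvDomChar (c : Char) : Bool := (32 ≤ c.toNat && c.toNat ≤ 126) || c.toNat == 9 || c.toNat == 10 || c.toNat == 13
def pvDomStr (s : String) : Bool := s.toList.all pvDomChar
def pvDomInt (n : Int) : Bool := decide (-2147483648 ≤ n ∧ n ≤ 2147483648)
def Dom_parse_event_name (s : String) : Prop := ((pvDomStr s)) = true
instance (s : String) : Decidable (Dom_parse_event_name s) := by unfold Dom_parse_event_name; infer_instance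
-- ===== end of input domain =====

-- B is a standard escape-aware scanner (a backslash escapes exactly the next character);
-- A's escape flag is never reset, so it differs on the D_ region stated below.

-- ===== PORT A =====
-- for-loop with break over s[1:]: state = escapedState (never reset, as in the Python);
-- returns (final chars, chars consumed by the loop).
def parseLoop : List Char → Bool → (List Char × Nat)
  | [], _ => ([], 0)
  | c :: t, esc =>
    if c = '\\' then
      let r := parseLoop t true
      (r.1, r.2 + 1)
    else if esc then
      let r := parseLoop t esc
      (c :: r.1, r.2 + 1)
    else if c ≠ ']' then
      let r := parseLoop t esc
      (c :: r.1, r.2 + 1)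
    else ([], 1)  -- ch == ']': break (counter was already incremented for this char)

def parse_event_name (s : String) : String × String :=
  let rest := PySem.Str.slice s (some 1) none          -- s[1:]
  let r := parseLoop rest.toList false
  (String.ofList r.1, PySem.Str.slice s (some (1 + (r.2 : Int))) none)   -- final, s[counter:]

-- ===== PORT B =====
-- while-loop over the characters from index 1: a backslash consumes two characters
-- (emitting the escaped one), an unescaped ']' returns early with the tail slice.
-- result: (name chars, some k = offset in s[1:] just past the ']' | none = ran off the end)
def escLoop : List Char → List Char × Option Nat
  | [] => ([], none)
  | [c] =>
    if c = '\\' then ([], none)                        -- trailing backslash: nothing to escape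
    else if c = ']' then ([], some 1)
    else ([c], none)
  | c :: d :: t =>
    if c = '\\' then
      let r := escLoop t
      (d :: r.1, r.2.map (· + 2))
    else if c = ']' then ([], some 1)
    else
      let r := escLoop (d :: t)
      (c :: r.1, r.2.map (· + 1))

def parse_event_name_alt (s : String) : String × String :=
  let r := escLoop (PySem.Str.slice s (some 1) none).toList
  match r.2 with
  | some k => (String.ofList r.1, PySem.Str.slice s (some (1 + (k : Int))) none)
  | none => (String.ofList r.1, "")

-- ===== PRECONDITION & SPEC =====
-- On strings whose part after '[' has a backslash before any ']' and, later, a double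
-- backslash or a ']' not immediately preceded by a backslash, A's never-resetting escape
-- flag swallows every later ']' and consumes the whole string, while B escapes only the
-- next character and stops at the first unescaped ']' — the intended Markdown link parse.
def D_parse_event_name (s : String) : Prop :=
  let r := (String.toList s).drop 1
  let b := r.findIdx (fun c => c == '\\')
  '\\' ∈ r ∧ ']' ∉ r.take b ∧
    (['\\', '\\'] <:+: r ∨ ∃ p ∈ (r.drop b).zip (r.drop b).tail, p.1 ≠ '\\' ∧ p.2 = ']')
instance (s : String) : Decidable (D_parse_event_name s) := by unfold D_parse_event_name; infer_instance

def Spec_parse_event_name (s : String) (out : String × String) : Prop := ¬ D_parse_event_name s → out = parse_event_name_alt s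
instance (s : String) (out : String × String) : Decidable (Spec_parse_event_name s out) := by unfold Spec_parse_event_name; infer_instance

def pvDiffWitness_parse_event_name : String := "[a\\b]c"
def pvDiffWitnessOut_parse_event_name : (String × String) × (String × String) := (("ab]c", ""), ("ab", "c"))

-- ===== CLAIM (what is proved, stated in full; the proofs are below) =====
def Claim_unchanged_parse_event_name : Prop := ∀ (s : String), Dom_parse_event_name s → Spec_parse_event_name s (parse_event_name s)
def Claim_changed_parse_event_name : Prop := Dom_parse_event_name (pvDiffWitness_parse_event_name) ∧ D_parse_event_name (pvDiffWitness_parse_event_name) ∧ parse_event_name (pvDiffWitness_parse_event_name) = pvDiffWitnessOut_parse_event_name.1 ∧ parse_event_name_alt (pvDiffWitness_parse_event_name) = pvDiffWitnessOut_parse_event_name.2 ∧ pvDiffWitnessOut_parse_event_name.1 ≠ pvDiffWitnessOut_parse_event_name.2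


-- ===== LEMMAS AND PROOFS =====

-- the slice s[1:] as a list
lemma toList_rest (s : String) :
    (PySem.Str.slice s (some 1) none).toList = s.toList.drop 1 := by
  rw [PySem.Str.toList_slice, PySem.Chars.slice_eq_listSlice]
  have : (1 : Int) = ((1 : Nat) : Int) := by norm_num
  rw [this, PySem.List.slice_from_natCast]

-- A past the first unescaped bracket position: slice of s beyond its end is empty
lemma slice_past (s : String) :
    PySem.Str.slice s (some (1 + ((s.toList.drop 1).length : Int))) none = "" := by
  apply String.toList_inj.mp
  rw [PySem.Str.toList_slice, PySem.Chars.slice_eq_listSlice]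
  rw [show (1 : Int) + ((s.toList.drop 1).length : Int)
      = ((1 + (s.toList.drop 1).length : Nat) : Int) by push_cast; ring]
  rw [PySem.List.slice_from_natCast]
  have h0 : s.toList.drop (1 + (s.toList.drop 1).length) = [] := by
    rw [List.drop_eq_nil_iff]
    simp only [List.length_drop]
    omega
  rw [h0]
  rfl

-- After the first backslash A's scan keeps everything except backslashes and never breaks.
lemma parseLoop_true (l : List Char) :
    parseLoop l true = (l.filter (fun c => c ≠ '\\'), l.length) := by
  induction l with
  | nil => rfl
  | cons c t ih =>
    by_cases hc : c = '\\' <;> simp [parseLoop, hc, ih]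

-- Full characterisation of A's scan, in terms of membership and first indices.
lemma parseLoop_false (l : List Char) :
    parseLoop l false =
      if ']' ∈ l ∧ ('\\' ∉ l ∨ l.findIdx (fun c => c == ']') < l.findIdx (fun c => c == '\\')) then
        (l.take (l.findIdx (fun c => c == ']')), l.findIdx (fun c => c == ']') + 1)
      else
        (l.filter (fun c => c ≠ '\\'), l.length) := by
  induction l with
  | nil => simp [parseLoop]
  | cons c t ih =>
    by_cases hb : c = '\\'
    · subst hb
      have hcond : ¬ (']' ∈ '\\' :: t ∧ ('\\' ∉ '\\' :: t ∨
          (('\\' :: t).findIdx (fun c => c == ']')) < (('\\' :: t).findIdx (fun c => c == '\\')))) := by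
        simp [List.findIdx_cons]
      simp only [hcond, if_false]
      simp [parseLoop, parseLoop_true]
    · by_cases hr : c = ']'
      · subst hr
        have hcond : (']' ∈ ']' :: t ∧ ('\\' ∉ ']' :: t ∨
            ((']' :: t).findIdx (fun c => c == ']')) < ((']' :: t).findIdx (fun c => c == '\\')))) := by
          constructor
          · simp
          · by_cases hk : '\\' ∈ ']' :: t
            · right; simp [List.findIdx_cons]
            · left; exact hk
        simp only [hcond]
        simp [parseLoop, List.findIdx_cons, hb]
      · simp only [parseLoop, if_neg hb, if_neg (by simp : ¬ (false : Bool) = true), ih]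
        by_cases hcond : ']' ∈ t ∧ ('\\' ∉ t ∨ t.findIdx (fun c => c == ']') < t.findIdx (fun c => c == '\\'))
        · have hcond' : ']' ∈ c :: t ∧ ('\\' ∉ c :: t ∨
              ((c :: t).findIdx (fun c => c == ']')) < ((c :: t).findIdx (fun c => c == '\\'))) := by
            obtain ⟨h1, h2⟩ := hcond
            refine ⟨List.mem_cons_of_mem _ h1, ?_⟩
            have hb' : (c == '\\') = false := by simp [hb]
            have hr' : (c == ']') = false := by simp [hr]
            rcases h2 with h2 | h2
            · left
              intro h
              rcases List.mem_cons.mp h with h | h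
              · exact hb h.symm
              · exact h2 h
            · right; simp only [List.findIdx_cons, hb', hr', cond_false]; omega
          have hb' : (c == '\\') = false := by simp [hb]
          have hr' : (c == ']') = false := by simp [hr]
          simp only [hcond, hcond']
          simp [List.findIdx_cons, hr', hr]
        · have hcond' : ¬ (']' ∈ c :: t ∧ ('\\' ∉ c :: t ∨
              ((c :: t).findIdx (fun c => c == ']')) < ((c :: t).findIdx (fun c => c == '\\')))) := by
            intro hC
            obtain ⟨h1, h2⟩ := hC
            apply hcond
            have hb' : (c == '\\') = false := by simp [hb]
            have hr' : (c == ']') = false := by simp [hr]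
            have h1' : ']' ∈ t := by
              rcases List.mem_cons.mp h1 with h | h
              · exact absurd h.symm hr
              · exact h
            refine ⟨h1', ?_⟩
            rcases h2 with h2 | h2
            · left; intro hk; exact h2 (List.mem_cons_of_mem _ hk)
            · right
              simp only [List.findIdx_cons, hb', hr', cond_false] at h2
              omega
          simp only [hcond, if_false, hcond', if_false]
          simp [hb, hr]

-- B-side equation lemmas (they hold for the one-element and cons patterns alike)
lemma escLoop_rb (t : List Char) : escLoop (']' :: t) = ([], some 1) := by
  cases t <;> simp [escLoop]

lemma escLoop_plain {c : Char} (h1 : c ≠ '\\') (h2 : c ≠ ']') (t : List Char) :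
    escLoop (c :: t) = (c :: (escLoop t).1, (escLoop t).2.map (· + 1)) := by
  cases t <;> simp [escLoop, h1, h2]

lemma escLoop_bs_cons (d : Char) (t : List Char) :
    escLoop ('\\' :: d :: t) = (d :: (escLoop t).1, (escLoop t).2.map (· + 2)) := by
  simp [escLoop]

-- a prefix free of backslashes and brackets is copied verbatim by B's scanner
lemma escLoop_prefix (u v : List Char) (h : ∀ c ∈ u, c ≠ '\\' ∧ c ≠ ']') :
    escLoop (u ++ v) = (u ++ (escLoop v).1, (escLoop v).2.map (· + u.length)) := by
  induction u with
  | nil => simp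
  | cons c u ih =>
    obtain ⟨h1, h2⟩ := h c (by simp)
    rw [List.cons_append, escLoop_plain h1 h2, ih (fun c hc => h c (by simp [hc]))]
    refine Prod.ext (by simp) ?_
    cases (escLoop v).2 <;> simp <;> omega

lemma zip_tail_subset (a : Char) (t : List Char) :
    t.zip t.tail ⊆ (a :: t).zip (a :: t).tail := by
  cases t with
  | nil => simp
  | cons b t' =>
    intro p hp
    simp only [List.tail_cons] at hp ⊢
    rw [List.zip_cons_cons]
    exact List.mem_cons_of_mem _ hp

-- on a block with no double backslash and every ']' escaped, B keeps all
-- non-backslash characters and runs off the end, exactly like A's sticky scan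
lemma escLoop_good : ∀ (n : Nat) (l : List Char), l.length ≤ n →
    ¬ (['\\', '\\'] <:+: l) →
    (∀ p ∈ l.zip l.tail, p.2 = ']' → p.1 = '\\') →
    l.head? ≠ some ']' →
    escLoop l = (l.filter (fun c => c ≠ '\\'), none) := by
  intro n
  induction n with
  | zero =>
    intro l hn _ _ _
    have : l = [] := List.eq_nil_of_length_eq_zero (by omega)
    subst this; rfl
  | succ n ih =>
    intro l hn h1 h2 h3
    match l with
    | [] => rfl
    | [c] =>
      have hc : c ≠ ']' := by intro h; exact h3 (by simp [h])
      by_cases hb : c = '\\' <;> simp [escLoop, hb, hc]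
    | c :: d :: t =>
      by_cases hb : c = '\\'
      · subst hb
        have hd : d ≠ '\\' := by
          intro h; subst h
          exact h1 ⟨[], t, rfl⟩
        have ht3 : t.head? ≠ some ']' := by
          cases t with
          | nil => simp
          | cons e t' =>
            intro h
            simp only [List.head?_cons, Option.some.injEq] at h
            have hde : (d, e) ∈ ('\\' :: d :: e :: t').zip ('\\' :: d :: e :: t').tail := by
              simp [List.zip_cons_cons]
            exact hd (h2 (d, e) hde h)
        have ht1 : ¬ (['\\', '\\'] <:+: t) := by
          intro h
          exact h1 (h.trans ((List.suffix_cons d t).trans (List.suffix_cons '\\' (d :: t))).isInfix)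
        have ht2 : ∀ p ∈ t.zip t.tail, p.2 = ']' → p.1 = '\\' :=
          fun p hp => h2 p (zip_tail_subset '\\' (d :: t) (zip_tail_subset d t hp))
        rw [escLoop_bs_cons, ih t (by simp at hn ⊢; omega) ht1 ht2 ht3]
        simp [hd]
      · have hc : c ≠ ']' := by intro h; exact h3 (by simp [h])
        have ht3 : (d :: t).head? ≠ some ']' := by
          intro h
          simp only [List.head?_cons, Option.some.injEq] at h
          have hcd : (c, d) ∈ (c :: d :: t).zip (c :: d :: t).tail := by
            simp [List.zip_cons_cons]
          exact hb (h2 (c, d) hcd h)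
        have ht1 : ¬ (['\\', '\\'] <:+: d :: t) := by
          intro h; exact h1 (h.trans (List.suffix_cons c (d :: t)).isInfix)
        have ht2 : ∀ p ∈ (d :: t).zip (d :: t).tail, p.2 = ']' → p.1 = '\\' :=
          fun p hp => h2 p (zip_tail_subset c (d :: t) hp)
        rw [escLoop_plain hb hc, ih (d :: t) (by simp at hn ⊢; omega) ht1 ht2 ht3]
        simp [hb]

lemma findIdx_lt_of_mem_take {x : Char} {l : List Char} {n : Nat} (h : x ∈ l.take n) :
    l.findIdx (fun c => c == x) < n := by
  obtain ⟨i, hi, hx⟩ := List.getElem_of_mem h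
  have hin : i < n := by
    have := hi; simp only [List.length_take] at this; omega
  rw [List.getElem_take] at hx
  by_contra hle
  have hlt : i < l.findIdx (fun c => c == x) := by omega
  have := List.not_of_lt_findIdx hlt
  rw [beq_eq_false_iff_ne] at this
  exact this hx

-- B stops exactly at the first ']' when nothing before it is a backslash or bracket
lemma escLoop_split (l : List Char) (hrb : ']' ∈ l)
    (hufree : ∀ c ∈ l.take (l.findIdx (fun c => c == ']')), c ≠ '\\' ∧ c ≠ ']') :
    escLoop l = (l.take (l.findIdx (fun c => c == ']')),
                 some (1 + l.findIdx (fun c => c == ']'))) := by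
  set j := l.findIdx (fun c => c == ']') with hj
  have hjl : j < l.length := List.findIdx_lt_length.mpr ⟨']', hrb, by simp⟩
  have hgj : l[j] = ']' := by
    have := @List.findIdx_getElem _ (fun c => c == ']') l (by rw [← hj]; exact hjl)
    simpa [← hj] using this
  have hdecomp : l = l.take j ++ ']' :: l.drop (j + 1) := by
    conv_lhs => rw [← List.take_append_drop j l]
    rw [List.drop_eq_getElem_cons hjl, hgj]
  conv_lhs => rw [hdecomp]
  rw [escLoop_prefix _ _ hufree, escLoop_rb]
  simp [List.length_take, Nat.min_eq_left (le_of_lt hjl)]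

-- ===== VERDICT (by name: the statement is the Claim_ definition above) =====
theorem parse_event_name_spec : Claim_unchanged_parse_event_name := by
  intro s _
  unfold Spec_parse_event_name
  intro hD
  unfold parse_event_name parse_event_name_alt
  simp only [toList_rest]
  set l := s.toList.drop 1 with hl
  rw [parseLoop_false l]
  by_cases hcond : ']' ∈ l ∧ ('\\' ∉ l ∨ l.findIdx (fun c => c == ']') < l.findIdx (fun c => c == '\\'))
  · obtain ⟨hrb, halt⟩ := hcond
    set j := l.findIdx (fun c => c == ']') with hj
    have hufree : ∀ c ∈ l.take j, c ≠ '\\' ∧ c ≠ ']' := by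
      intro c hc
      obtain ⟨i, hi, hx⟩ := List.getElem_of_mem hc
      have hij : i < j := by
        have := hi; simp only [List.length_take] at this; omega
      rw [List.getElem_take] at hx
      constructor
      · rcases halt with h | h
        · intro hcc; exact h (hcc ▸ List.mem_of_mem_take hc)
        · intro hcc
          have hlt : i < l.findIdx (fun c => c == '\\') := by omega
          have := List.not_of_lt_findIdx hlt
          rw [beq_eq_false_iff_ne] at this
          exact this (hcc ▸ hx)
      · intro hcc
        have := List.not_of_lt_findIdx (hj ▸ hij)
        rw [beq_eq_false_iff_ne] at this
        exact this (hcc ▸ hx)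
    rw [if_pos ⟨hrb, halt⟩, escLoop_split l hrb hufree]
    have : ((j + 1 : Nat) : Int) = ((1 + j : Nat) : Int) := by push_cast; ring
    simp [this]
    exact ⟨by rw [hj], by rw [hj]⟩
  · rw [if_neg hcond]
    have hesc : escLoop l = (l.filter (fun c => c ≠ '\\'), none) := by
      by_cases hbs : '\\' ∈ l
      · set b := l.findIdx (fun c => c == '\\') with hb
        have hbl : b < l.length := List.findIdx_lt_length.mpr ⟨'\\', hbs, by simp⟩
        have hgb : l[b] = '\\' := by
          have := @List.findIdx_getElem _ (fun c => c == '\\') l (by rw [← hb]; exact hbl)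
          simpa [← hb] using this
        have hjb : ']' ∉ l.take b := by
          intro h
          exact hcond ⟨List.mem_of_mem_take h, Or.inr (findIdx_lt_of_mem_take h)⟩
        have hnd : ¬ (['\\', '\\'] <:+: l ∨
            ∃ p ∈ (l.drop b).zip (l.drop b).tail, p.1 ≠ '\\' ∧ p.2 = ']') := by
          intro h
          exact hD ⟨hbs, hjb, h⟩
        have hnd1 : ¬ (['\\', '\\'] <:+: l) := fun h => hnd (Or.inl h)
        have hnd2 : ∀ p ∈ (l.drop b).zip (l.drop b).tail, ¬ (p.1 ≠ '\\' ∧ p.2 = ']') :=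
          fun p hp hc => hnd (Or.inr ⟨p, hp, hc⟩)
        have hufree : ∀ c ∈ l.take b, c ≠ '\\' ∧ c ≠ ']' := by
          intro c hc
          refine ⟨?_, fun hcc => hjb (hcc ▸ hc)⟩
          obtain ⟨i, hi, hx⟩ := List.getElem_of_mem hc
          have hib : i < b := by
            have := hi; simp only [List.length_take] at this; omega
          rw [List.getElem_take] at hx
          intro hcc
          have := List.not_of_lt_findIdx (hb ▸ hib)
          rw [beq_eq_false_iff_ne] at this
          exact this (hcc ▸ hx)
        have hgood : escLoop (l.drop b) = ((l.drop b).filter (fun c => c ≠ '\\'), none) := by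
          apply escLoop_good (l.drop b).length _ le_rfl
          · intro h; exact hnd1 (h.trans (List.drop_suffix b l).isInfix)
          · intro p hp hpr
            by_contra hpc
            exact (hnd2 p hp ⟨hpc, hpr⟩).elim
          · rw [List.head?_drop]
            simp [List.getElem?_eq_getElem hbl, hgb]
        have : l = l.take b ++ l.drop b := (List.take_append_drop b l).symm
        conv_lhs => rw [this]
        rw [escLoop_prefix _ _ hufree, hgood]
        refine Prod.ext ?_ (by simp)
        simp only
        conv_rhs => rw [this]
        rw [List.filter_append]
        congr 1
        rw [eq_comm, List.filter_eq_self]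
        intro c hc
        simpa using (hufree c hc).1
      · apply escLoop_good l.length _ le_rfl
        · intro h
          exact hbs (h.sublist.subset (by simp))
        · intro p hp hpr
          have hrb : ']' ∉ l := fun h => hcond ⟨h, Or.inl hbs⟩
          have : p.2 ∈ l.tail := (List.of_mem_zip hp).2
          exact absurd ((List.tail_sublist l).subset this) (hpr ▸ hrb)
        · intro h
          exact hcond ⟨List.mem_of_mem_head? (Option.mem_def.mpr h), Or.inl hbs⟩
    rw [hesc]
    simp only [hl]
    rw [slice_past s]
theorem parse_event_name_changed : Claim_changed_parse_event_name := by
  unfold Claim_changed_parse_event_name; decide
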